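-- pv_equiv track=rewrite | github.com/Alexandara/Computational-Logic-Prolog | ProjectCode.py | sanitizehelp
-- ===== SOURCE A (Python) =====
-- def sanitizehelp(pred1, first, second):
--     pred = pred1
--     cooked = []
--     for i in range(pred.count(first)):
--         pred.replace(first, '', 1)
--         if pred.count(second[0]) > 0:
--             cooked.append(first + "(" + second[0] +")")
--             pred.replace(second[0], '', 1)
--         elif pred.count(second[1]) > 0:
--             cooked.append(first + "(" + second[1] +")")
--             pred.replace(second[1], '', 1)
--         elif pred.count(second[2]) > 0:
--             cooked.append(first + "(" + second[2] +")")
--             pred.replace(second[2], '', 1)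
--         elif pred.count(second[3]) > 0:
--             cooked.append(first + "(" + second[3] +")")
--             pred.replace(second[3], '', 1)
--         elif pred.count("query") > 0:
--             cooked.append(first + "(query)")
--             pred.replace("query", '', 1)
--     return pred, cooked
-- ===== SOURCE B (Python) =====
-- def sanitizehelp(pred1, first, second):
--     # A's str.replace results are discarded, so pred never changes: every loop
--     # iteration appends the same choice.  B finds the first matching candidate
--     # in one scan over second[:4] + ["query"] and repeats it count(first) times.
--     n = pred1.count(first)
--     if n == 0:
--         return pred1, []
--     for tok in list(second[:4]) + ["query"]:
--         if pred1.count(tok) > 0: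
--             return pred1, n * [first + "(" + tok + ")"]
--     return pred1, []
-- ===== Notes on version B (the rewrite author's own statement) =====
-- stated objective: simpler
-- what changed: A's loop body never changes its state (str.replace results are discarded), so B drops the loop and the elif cascade: it scans the candidate list second[:4]+['query'] once for the first token occurring in pred1 and returns that string repeated count(first) times.
import Mathlib
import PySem

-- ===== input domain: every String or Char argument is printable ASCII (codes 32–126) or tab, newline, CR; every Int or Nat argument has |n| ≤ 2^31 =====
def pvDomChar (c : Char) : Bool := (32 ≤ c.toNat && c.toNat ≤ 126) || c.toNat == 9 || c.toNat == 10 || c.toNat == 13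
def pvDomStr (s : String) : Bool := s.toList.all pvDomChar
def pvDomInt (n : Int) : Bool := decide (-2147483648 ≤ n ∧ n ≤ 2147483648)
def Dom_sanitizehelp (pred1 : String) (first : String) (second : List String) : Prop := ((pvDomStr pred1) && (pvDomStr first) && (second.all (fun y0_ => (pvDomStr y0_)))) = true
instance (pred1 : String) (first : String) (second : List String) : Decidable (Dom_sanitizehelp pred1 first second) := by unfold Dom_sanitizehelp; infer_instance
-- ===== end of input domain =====

-- B replaces A's loop (whose body never changes its state: the str.replace results are
-- discarded) and its elif cascade by one scan of the candidate list second[:4]+["query"]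
-- for the first token occurring in pred1, repeated count(first) times.

-- ===== PORT A =====
-- The Python statements `pred.replace(..., '', 1)` discard their results (str.replace is
-- pure), so they are ported as no-ops; `pred` is the loop state and never changes.
def sanitizehelp (pred1 : String) (first : String) (second : List String) : String × List String :=
  let pred := pred1
  let cooked : List String := []
  let r := (PySem.List.pyRange 0 (PySem.Str.count pred first : Int) 1).foldl
    (fun (st : String × List String) _ =>
      let pred := st.1
      let cooked := st.2
      -- pred.replace(first, '', 1)  -- result discarded
      if PySem.Str.count pred (PySem.List.pyGetD second 0 "") > 0 then
        (pred, cooked ++ [first ++ "(" ++ PySem.List.pyGetD second 0 "" ++ ")"])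
      else if PySem.Str.count pred (PySem.List.pyGetD second 1 "") > 0 then
        (pred, cooked ++ [first ++ "(" ++ PySem.List.pyGetD second 1 "" ++ ")"])
      else if PySem.Str.count pred (PySem.List.pyGetD second 2 "") > 0 then
        (pred, cooked ++ [first ++ "(" ++ PySem.List.pyGetD second 2 "" ++ ")"])
      else if PySem.Str.count pred (PySem.List.pyGetD second 3 "") > 0 then
        (pred, cooked ++ [first ++ "(" ++ PySem.List.pyGetD second 3 "" ++ ")"])
      else if PySem.Str.count pred "query" > 0 then
        (pred, cooked ++ [first ++ "(query)"])
      else (pred, cooked))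
    (pred, cooked)
  r

-- ===== PORT B =====
def sanitizehelp_alt (pred1 : String) (first : String) (second : List String) : String × List String :=
  let n := PySem.Str.count pred1 first
  if n = 0 then (pred1, [])
  else
    match (PySem.List.slice second (some 0) (some 4) ++ ["query"]).find?
        (fun tok => PySem.Str.count pred1 tok > 0) with
    | some tok => (pred1, List.replicate n (first ++ "(" ++ tok ++ ")"))
    | none => (pred1, [])

-- ===== PRECONDITION & SPEC =====
-- Pre_ excludes exactly the inputs where Python A raises IndexError: the loop runs
-- (count(first) > 0), second has fewer than 4 elements, and none of its elements occurs
-- in pred1, so the cascade indexes second past its end.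
def Pre_sanitizehelp (pred1 : String) (first : String) (second : List String) : Prop :=
  PySem.Str.count pred1 first = 0 ∨ 4 ≤ second.length ∨ ∃ s ∈ second, 0 < PySem.Str.count pred1 s
instance (pred1 : String) (first : String) (second : List String) : Decidable (Pre_sanitizehelp pred1 first second) := by unfold Pre_sanitizehelp; infer_instance

def pvWitness_sanitizehelp : String × String × List String := ("p(a) p(b)", "p", ["a", "b", "c", "d"])

def Spec_sanitizehelp (pred1 : String) (first : String) (second : List String) (out : String × List String) : Prop := out = sanitizehelp_alt pred1 first second
instance (pred1 : String) (first : String) (second : List String) (out : String × List String) : Decidable (Spec_sanitizehelp pred1 first second out) := by unfold Spec_sanitizehelp; infer_instance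

-- ===== CLAIM (what is proved, stated in full; the proofs are below) =====
def Claim_equal_sanitizehelp : Prop := ∀ (pred1 : String) (first : String) (second : List String), Dom_sanitizehelp pred1 first second → Pre_sanitizehelp pred1 first second → Spec_sanitizehelp pred1 first second (sanitizehelp pred1 first second)

-- ===== LEMMAS AND PROOFS =====

-- A fold whose step leaves the first component alone and appends a fixed chunk to the second.
theorem foldl_snd_append {β : Type} (X : List String) (p : String) :
    ∀ (l : List β) (c : List String)
      (step : String × List String → β → String × List String)
      (hstep : ∀ c' b, step (p, c') b = (p, c' ++ X)),
      l.foldl step (p, c) = (p, c ++ (List.replicate l.length X).flatten) := by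
  intro l
  induction l with
  | nil => intro c step _; simp
  | cons b l ih =>
      intro c step hstep
      simp only [List.foldl_cons, hstep, List.length_cons, List.replicate_succ,
        List.flatten_cons, ih (c ++ X) step hstep, List.append_assoc]

-- The single chunk A's cascade appends per iteration (possibly empty); proof-side helper.
def pickA (pred1 : String) (first : String) (second : List String) : List String :=
  if PySem.Str.count pred1 (PySem.List.pyGetD second 0 "") > 0 then
    [first ++ "(" ++ PySem.List.pyGetD second 0 "" ++ ")"]
  else if PySem.Str.count pred1 (PySem.List.pyGetD second 1 "") > 0 then
    [first ++ "(" ++ PySem.List.pyGetD second 1 "" ++ ")"]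
  else if PySem.Str.count pred1 (PySem.List.pyGetD second 2 "") > 0 then
    [first ++ "(" ++ PySem.List.pyGetD second 2 "" ++ ")"]
  else if PySem.Str.count pred1 (PySem.List.pyGetD second 3 "") > 0 then
    [first ++ "(" ++ PySem.List.pyGetD second 3 "" ++ ")"]
  else if PySem.Str.count pred1 "query" > 0 then
    [first ++ "(query)"]
  else []

-- Under Pre_'s non-crashing condition, the cascade's choice is the first match
-- of B's candidate list.
set_option maxHeartbeats 2000000 in
theorem pickA_eq_find (pred1 first : String) (second : List String)
    (h : 4 ≤ second.length ∨ ∃ s ∈ second, 0 < PySem.Str.count pred1 s) :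
    pickA pred1 first second =
      match (second.take 4 ++ ["query"]).find? (fun tok => PySem.Str.count pred1 tok > 0) with
      | some tok => [first ++ "(" ++ tok ++ ")"]
      | none => [] := by
  unfold pickA
  match second with
  | [] =>
      rcases h with h | ⟨s, hs, _⟩
      · simp at h
      · simp at hs
  | [a] =>
      rcases h with h | ⟨s, hs, hc⟩
      · simp at h
      · simp only [List.mem_cons, List.not_mem_nil, or_false] at hs
        subst hs
        have g0 : PySem.List.pyGetD [s] 0 "" = s := by simp [pysem]
        rw [g0]
        have ha : 0 < PySem.Chars.count pred1.toList s.toList := by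
          simpa [PySem.Str.count] using hc
        simp [ha]
  | [a, b] =>
      rcases h with h | ⟨s, hs, hc⟩
      · simp at h
      · simp only [List.mem_cons, List.not_mem_nil, or_false] at hs
        have g0 : PySem.List.pyGetD [a, b] 0 "" = a := by simp [pysem]
        have g1 : PySem.List.pyGetD [a, b] 1 "" = b := by simp [pysem]
        rw [g0, g1]
        have hc' : 0 < PySem.Chars.count pred1.toList s.toList := by
          simpa [PySem.Str.count] using hc
        by_cases ha : 0 < PySem.Chars.count pred1.toList a.toList
        · simp [ha]
        · have hb : 0 < PySem.Chars.count pred1.toList b.toList := by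
            rcases hs with rfl | rfl
            · exact absurd hc' ha
            · exact hc'
          simp [ha, hb]
  | [a, b, c] =>
      rcases h with h | ⟨s, hs, hc⟩
      · simp at h
      · simp only [List.mem_cons, List.not_mem_nil, or_false] at hs
        have g0 : PySem.List.pyGetD [a, b, c] 0 "" = a := by simp [pysem]
        have g1 : PySem.List.pyGetD [a, b, c] 1 "" = b := by simp [pysem]
        have g2 : PySem.List.pyGetD [a, b, c] 2 "" = c := by simp [pysem]
        rw [g0, g1, g2]
        have hc' : 0 < PySem.Chars.count pred1.toList s.toList := by
          simpa [PySem.Str.count] using hc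
        by_cases ha : 0 < PySem.Chars.count pred1.toList a.toList
        · simp [ha]
        · by_cases hb : 0 < PySem.Chars.count pred1.toList b.toList
          · simp [ha, hb]
          · have hcc : 0 < PySem.Chars.count pred1.toList c.toList := by
              rcases hs with rfl | rfl | rfl
              · exact absurd hc' ha
              · exact absurd hc' hb
              · exact hc'
            simp [ha, hb, hcc]
  | a :: b :: c :: d :: rest =>
      have g0 : PySem.List.pyGetD (a :: b :: c :: d :: rest) 0 "" = a := by simp [pysem]
      have g1 : PySem.List.pyGetD (a :: b :: c :: d :: rest) 1 "" = b := by simp [pysem]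
      have g2 : PySem.List.pyGetD (a :: b :: c :: d :: rest) 2 "" = c := by simp [pysem]
      have g3 : PySem.List.pyGetD (a :: b :: c :: d :: rest) 3 "" = d := by simp [pysem]
      rw [g0, g1, g2, g3]
      simp only [List.take, List.cons_append, List.nil_append, List.find?]
      by_cases ha : 0 < PySem.Chars.count pred1.toList a.toList
      · simp [ha]
      · by_cases hb : 0 < PySem.Chars.count pred1.toList b.toList
        · simp [ha, hb]
        · by_cases hc : 0 < PySem.Chars.count pred1.toList c.toList
          · simp [ha, hb, hc]
          · by_cases hd : 0 < PySem.Chars.count pred1.toList d.toList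
            · simp [ha, hb, hc, hd]
            · by_cases hq : 0 < PySem.Chars.count pred1.toList ['q', 'u', 'e', 'r', 'y']
              · have hqstr : ("(" : String) ++ "query" ++ ")" = "(query)" := by decide
                simp [ha, hb, hc, hd, hq]
                rw [← hqstr, ← String.append_assoc, ← String.append_assoc]
              · simp [ha, hb, hc, hd, hq]

set_option maxHeartbeats 1000000 in
theorem sanitizehelp_eq (pred1 first : String) (second : List String)
    (hpre : Pre_sanitizehelp pred1 first second) :
    sanitizehelp pred1 first second = sanitizehelp_alt pred1 first second := by
  unfold sanitizehelp sanitizehelp_alt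
  dsimp only
  rw [foldl_snd_append (pickA pred1 first second) pred1 _ _ _ ?hstep]
  case hstep =>
    intro c' b
    dsimp only
    unfold pickA
    split_ifs <;> simp
  have hlen : (PySem.List.pyRange 0 ((PySem.Str.count pred1 first : Nat) : Int) 1).length
      = PySem.Str.count pred1 first := by
    simp [PySem.List.length_pyRange_one]
  rw [hlen]
  have hslice : PySem.List.slice second (some 0) (some 4) = second.take 4 := by
    simp [pysem]
  rw [hslice]
  by_cases hn : PySem.Str.count pred1 first = 0
  · simp only [PySem.Str.count] at hn
    simp [hn, PySem.Str.count]
  · have hn' : ¬ PySem.Chars.count pred1.toList first.toList = 0 := by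
      simpa [PySem.Str.count] using hn
    have h : 4 ≤ second.length ∨ ∃ s ∈ second, 0 < PySem.Str.count pred1 s := by
      rcases hpre with h0 | h | h
      · exact absurd h0 hn
      · exact Or.inl h
      · exact Or.inr h
    rw [pickA_eq_find pred1 first second h]
    rcases hfind : (second.take 4 ++ ["query"]).find? (fun tok => PySem.Str.count pred1 tok > 0) with
      _ | tok
    · simp [hn', PySem.Str.count]
    · simp [hn', PySem.Str.count]

-- ===== VERDICT =====
theorem sanitizehelp_spec : Claim_equal_sanitizehelp := by
  intro pred1 first second _ hpre
  exact sanitizehelp_eq pred1 first second hpre
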